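-- pv_equiv track=rewrite | github.com/BereniceAlexiaJocteur/Euler | pb147.py | number_rectangles_diagonal
-- ===== SOURCE A (Python) =====
-- def number_rectangles_diagonal(m, n):
--     total = 0
--     for i in range(2*n+1):
--         if i % 2 == 0:
--             for j in range(m+1):
--                 x = i
--                 y = 2*j
--                 dhaut = 1
--                 while x+dhaut < 2*n+1:
--                     dbas = 1
--                     test = True
--                     while x-dbas >= 0 and test:
--                         if y + dbas + dhaut < 2*m+1:
--                             total += 1
--                         else:
--                             test = False
--                         dbas += 1
--                     dhaut += 1
--         else:
--             for j in range(m):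
--                 x = i
--                 y = 2*j+1
--                 dhaut = 1
--                 while x + dhaut < 2*n+1:
--                     dbas = 1
--                     test = True
--                     while x - dbas >= 0 and test:
--                         if y + dbas + dhaut < 2*m+1:
--                             total += 1
--                         else:
--                             test = False
--                         dbas += 1
--                     dhaut += 1
--     return total
-- ===== SOURCE B (Python) =====
-- def number_rectangles_diagonal(m, n):
--     # g(u, x) = sum_{t=1..u} clamp(t, 0, x): prefix sums of the clamped ramp
--     def g(u, x):
--         if u <= 0:
--             return 0
--         if u <= x:
--             return u * (u + 1) // 2
--         return x * (x + 1) // 2 + (u - x) * x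
--
--     total = 0
--     for x in range(2 * n + 1):
--         if x % 2 == 0:
--             for j in range(m + 1):
--                 y = 2 * j
--                 total += g(2 * m - y - 1, x) - g(2 * m - y - 1 - (2 * n - x), x)
--         else:
--             for j in range(m):
--                 y = 2 * j + 1
--                 total += g(2 * m - y - 1, x) - g(2 * m - y - 1 - (2 * n - x), x)
--     return total
-- ===== Notes on version B (the rewrite author's own statement) =====
-- stated objective: faster
-- what changed: The two nested counting while-loops per grid point are replaced by a closed-form arithmetic expression (difference of clamped-ramp prefix sums), removing two nesting levels.
import Mathlib
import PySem

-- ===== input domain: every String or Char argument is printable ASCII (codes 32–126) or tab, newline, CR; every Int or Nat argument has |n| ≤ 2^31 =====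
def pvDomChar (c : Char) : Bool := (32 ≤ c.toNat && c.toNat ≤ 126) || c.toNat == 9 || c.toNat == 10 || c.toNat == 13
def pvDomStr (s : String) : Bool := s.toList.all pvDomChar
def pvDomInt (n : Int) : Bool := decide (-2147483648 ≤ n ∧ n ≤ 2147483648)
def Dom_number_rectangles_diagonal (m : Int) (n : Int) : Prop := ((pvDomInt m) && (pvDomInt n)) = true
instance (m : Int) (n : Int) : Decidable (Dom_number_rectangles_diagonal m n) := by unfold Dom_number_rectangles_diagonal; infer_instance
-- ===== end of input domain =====

-- B replaces the two innermost counting while-loops of A by a closed-form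
-- arithmetic expression per grid point (objective: faster, O(n*m) vs O(n^2*m^2)).

-- ===== PORT A =====
-- inner 'while x - dbas >= 0 and test' loop of A
def pvInnerA (m x y dhaut dbas : Int) (test : Bool) (total : Int) : Int :=
  if h : 0 ≤ x - dbas ∧ test = true then
    if y + dbas + dhaut < 2 * m + 1 then
      pvInnerA m x y dhaut (dbas + 1) true (total + 1)
    else
      pvInnerA m x y dhaut (dbas + 1) false total
  else total
termination_by (x - dbas + 1).toNat
decreasing_by all_goals omega

-- outer 'while x + dhaut < 2*n + 1' loop of A
def pvOuterA (m n x y dhaut total : Int) : Int :=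
  if _h : x + dhaut < 2 * n + 1 then
    pvOuterA m n x y (dhaut + 1) (pvInnerA m x y dhaut 1 true total)
  else total
termination_by (2 * n + 1 - (x + dhaut)).toNat
decreasing_by omega

def number_rectangles_diagonal (m : Int) (n : Int) : Int :=
  (PySem.List.pyRange 0 (2 * n + 1) 1).foldl (fun total i =>
    if PySem.Int.mod i 2 = 0 then
      (PySem.List.pyRange 0 (m + 1) 1).foldl (fun tot j => pvOuterA m n i (2 * j) 1 tot) total
    else
      (PySem.List.pyRange 0 m 1).foldl (fun tot j => pvOuterA m n i (2 * j + 1) 1 tot) total) 0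

-- ===== PORT B =====
-- g(u, x) = sum_{t=1..u} clamp(t, 0, x): prefix sums of the clamped ramp
def pvG (u x : Int) : Int :=
  if u ≤ 0 then 0
  else if u ≤ x then PySem.Int.floordiv (u * (u + 1)) 2
  else PySem.Int.floordiv (x * (x + 1)) 2 + (u - x) * x

def number_rectangles_diagonal_alt (m : Int) (n : Int) : Int :=
  (PySem.List.pyRange 0 (2 * n + 1) 1).foldl (fun total x =>
    if PySem.Int.mod x 2 = 0 then
      (PySem.List.pyRange 0 (m + 1) 1).foldl (fun total j =>
        total + (pvG (2 * m - 2 * j - 1) x - pvG (2 * m - 2 * j - 1 - (2 * n - x)) x)) total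
    else
      (PySem.List.pyRange 0 m 1).foldl (fun total j =>
        total + (pvG (2 * m - (2 * j + 1) - 1) x - pvG (2 * m - (2 * j + 1) - 1 - (2 * n - x)) x)) total) 0

-- ===== PRECONDITION & SPEC =====
def Spec_number_rectangles_diagonal (m : Int) (n : Int) (out : Int) : Prop := out = number_rectangles_diagonal_alt m n
instance (m : Int) (n : Int) (out : Int) : Decidable (Spec_number_rectangles_diagonal m n out) := by unfold Spec_number_rectangles_diagonal; infer_instance

-- ===== CLAIM (what is proved, stated in full; the proofs are below) =====
def Claim_equal_number_rectangles_diagonal : Prop := ∀ (m : Int) (n : Int), Dom_number_rectangles_diagonal m n → Spec_number_rectangles_diagonal m n (number_rectangles_diagonal m n)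

-- ===== LEMMAS AND PROOFS =====

-- the inner while-loop counts the dbas in [dbas, min x (2m - y - dhaut)]
theorem pvInnerA_eq (m x y dhaut dbas total : Int) :
    pvInnerA m x y dhaut dbas true total
      = total + max 0 (min x (2 * m - y - dhaut) - dbas + 1) := by
  rw [pvInnerA]
  by_cases h1 : 0 ≤ x - dbas
  · rw [dif_pos ⟨h1, rfl⟩]
    split_ifs with h2
    · rw [pvInnerA_eq m x y dhaut (dbas + 1) (total + 1)]
      omega
    · rw [pvInnerA, dif_neg (by simp)]
      omega
  · rw [dif_neg (fun hc => h1 hc.1)]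
    omega
termination_by (x - dbas + 1).toNat
decreasing_by omega

-- 2 * (v*(v+1) // 2) = v*(v+1)
theorem pvG_div (v : Int) : 2 * PySem.Int.floordiv (v * (v + 1)) 2 = v * (v + 1) := by
  rw [PySem.Int.floordiv_eq_ediv_of_pos (by norm_num)]
  exact Int.mul_ediv_cancel' (Int.even_mul_succ_self v).two_dvd

-- one step of the clamped-ramp prefix sums
theorem pvG_step (u x : Int) (hx : 0 ≤ x) :
    pvG u x = pvG (u - 1) x + max 0 (min x u) := by
  have d1 := pvG_div u
  have d2 := pvG_div (u - 1)
  have d3 := pvG_div x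
  unfold pvG
  rcases lt_or_ge 0 u with hu | hu
  · rw [if_neg (by omega)]
    rcases le_or_gt u x with hux | hux
    · rw [if_pos hux]
      rcases le_or_gt (u - 1) 0 with hu1 | hu1
      · rw [if_pos hu1]
        have h1 : u = 1 := by omega
        subst h1
        have hm : max 0 (min x 1) = 1 := by omega
        rw [hm]
        decide
      · rw [if_neg (by omega), if_pos (by omega : u - 1 ≤ x)]
        have hm : max 0 (min x u) = u := by omega
        rw [hm]
        nlinarith [d1, d2]
    · rw [if_neg (by omega)]
      have hm : max 0 (min x u) = x := by omega
      rw [hm]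
      rcases le_or_gt (u - 1) 0 with hu1 | hu1
      · rw [if_pos hu1]
        have hx0 : x = 0 := by omega
        have hu' : u = 1 := by omega
        subst hx0; subst hu'
        decide
      · rw [if_neg (by omega)]
        rcases le_or_gt (u - 1) x with h1x | h1x
        · have hu' : u = x + 1 := by omega
          subst hu'
          rw [if_pos (by omega : x + 1 - 1 ≤ x)]
          nlinarith [d2, d3]
        · rw [if_neg (by omega)]
          ring
  · rw [if_pos (by omega), if_pos (by omega : u - 1 ≤ 0)]
    omega

-- the outer while-loop sums the closed form over dhaut
theorem pvOuterA_eq (m n x y dhaut total : Int) (hx : 0 ≤ x) (hd : dhaut ≤ 2 * n - x + 1) :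
    pvOuterA m n x y dhaut total
      = total + (pvG (2 * m - y - dhaut) x - pvG (2 * m - y - 1 - (2 * n - x)) x) := by
  rw [pvOuterA]
  split_ifs with h
  · rw [pvInnerA_eq, pvOuterA_eq m n x y (dhaut + 1) _ hx (by omega)]
    have := pvG_step (2 * m - y - dhaut) x hx
    have heq : 2 * m - y - (dhaut + 1) = 2 * m - y - dhaut - 1 := by ring
    rw [heq]
    omega
  · have : dhaut = 2 * n - x + 1 := by omega
    subst this
    have heq : 2 * m - y - (2 * n - x + 1) = 2 * m - y - 1 - (2 * n - x) := by ring
    rw [heq]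
    omega
termination_by (2 * n + 1 - (x + dhaut)).toNat
decreasing_by omega

-- one grid point: A's two while-loops equal B's closed form
theorem pvCell_eq (m n x y total : Int) (hx : 0 ≤ x) (hxn : x ≤ 2 * n) :
    pvOuterA m n x y 1 total
      = total + (pvG (2 * m - y - 1) x - pvG (2 * m - y - 1 - (2 * n - x)) x) := by
  exact pvOuterA_eq m n x y 1 total hx (by omega)

-- ===== VERDICT (by name: the statement is the Claim_ definition above) =====
theorem number_rectangles_diagonal_spec : Claim_equal_number_rectangles_diagonal := by
  intro m n _
  unfold Spec_number_rectangles_diagonal number_rectangles_diagonal number_rectangles_diagonal_alt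
  apply PySem.List.foldl_congr_mem
  intro acc i hi
  rw [PySem.List.mem_pyRange_one] at hi
  split_ifs
  · apply PySem.List.foldl_congr_mem
    intro tot j _
    exact pvCell_eq m n i (2 * j) tot (by omega) (by omega)
  · apply PySem.List.foldl_congr_mem
    intro tot j _
    exact pvCell_eq m n i (2 * j + 1) tot (by omega) (by omega)
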